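-- pv_equiv track=rewrite | github.com/githubao/xiao-awesome-zhihu | zhihu/utils.py | remove_invalid_chars
-- ===== SOURCE A (Python) =====
-- DEFAULT_INVALID_CHARS = {':', '*', '?', '"', '<', '>', '|', '\r', '\n', '\''}
--
-- EXTRA_CHAR_FOR_FILENAME = {'/', '\\'}
--
-- def remove_invalid_chars(dirty, invalid_chars=None, for_path=False):
--     if invalid_chars is None:
--         invalid_chars = set(DEFAULT_INVALID_CHARS)
--     else:
--         invalid_chars = set(invalid_chars)
--         invalid_chars.update(DEFAULT_INVALID_CHARS)
--
--     if not for_path: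
--         invalid_chars.update(EXTRA_CHAR_FOR_FILENAME)
--
--     return ''.join([c for c in dirty if c not in invalid_chars]).strip()
-- ===== SOURCE B (Python) =====
-- DEFAULT_INVALID_CHARS = {':', '*', '?', '"', '<', '>', '|', '\r', '\n', '\''}
--
-- EXTRA_CHAR_FOR_FILENAME = {'/', '\\'}
--
-- def remove_invalid_chars(dirty, invalid_chars=None, for_path=False):
--     # Staged passes: delete each forbidden character from the string in turn,
--     # one replace pass per character, instead of one filtering pass over the
--     # string. Deleting characters one at a time commutes, so the result equals
--     # the single-pass filter. Multi-character entries cannot match any single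
--     # character, so they are skipped (A's per-character test ignores them too).
--     chars = set(DEFAULT_INVALID_CHARS)
--     if invalid_chars is not None:
--         chars.update(invalid_chars)
--     if not for_path:
--         chars.update(EXTRA_CHAR_FOR_FILENAME)
--     for ch in chars:
--         if len(ch) == 1:
--             dirty = dirty.replace(ch, '')
--     return dirty.strip()
-- ===== Notes on version B (the rewrite author's own statement) =====
-- stated objective: alternative
-- what changed: B inverts the traversal: instead of A's single comprehension pass over the string testing each character against the invalid set, B loops over the invalid-character set and deletes each single-character entry from the string with its own str.replace pass (deletions commute, so the result is the same filter).
import Mathlib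
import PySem

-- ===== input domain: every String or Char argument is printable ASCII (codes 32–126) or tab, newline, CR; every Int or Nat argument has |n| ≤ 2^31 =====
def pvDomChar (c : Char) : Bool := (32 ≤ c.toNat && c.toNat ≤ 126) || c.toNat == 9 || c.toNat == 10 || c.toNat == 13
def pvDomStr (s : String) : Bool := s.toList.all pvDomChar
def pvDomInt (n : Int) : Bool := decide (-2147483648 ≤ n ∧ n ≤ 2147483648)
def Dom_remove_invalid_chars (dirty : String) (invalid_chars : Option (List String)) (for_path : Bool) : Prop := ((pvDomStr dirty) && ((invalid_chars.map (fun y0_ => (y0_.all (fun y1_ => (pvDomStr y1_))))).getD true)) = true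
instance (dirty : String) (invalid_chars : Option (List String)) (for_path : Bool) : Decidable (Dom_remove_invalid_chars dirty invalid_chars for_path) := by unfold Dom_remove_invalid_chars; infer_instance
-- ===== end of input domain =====

-- B inverts the traversal: it loops over the invalid-character set and deletes each
-- single-character entry from the string with its own replace pass, instead of A's single
-- comprehension pass testing each character of the string (alternative; no speed claim).

def pvDefaultInvalidChars : List String := [":", "*", "?", "\"", "<", ">", "|", "\r", "\n", "'"]

def pvExtraCharForFilename : List String := ["/", "\\"]

-- ===== PORT A =====
def remove_invalid_chars (dirty : String) (invalid_chars : Option (List String)) (for_path : Bool) : String :=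
  let inv : PySem.Set String :=
    match invalid_chars with
    | none => PySem.Set.ofList pvDefaultInvalidChars
    | some l => PySem.Set.update (PySem.Set.ofList l) pvDefaultInvalidChars
  let inv : PySem.Set String :=
    if !for_path then PySem.Set.update inv pvExtraCharForFilename else inv
  PySem.Str.strip (PySem.Str.join ""
    ((dirty.toList.filter (fun c => !(PySem.Set.contains inv (String.ofList [c])))).map
      (fun c => String.ofList [c])))

-- ===== PORT B =====
def remove_invalid_chars_alt (dirty : String) (invalid_chars : Option (List String)) (for_path : Bool) : String :=
  let chars : PySem.Set String := PySem.Set.ofList pvDefaultInvalidChars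
  let chars : PySem.Set String :=
    match invalid_chars with
    | none => chars
    | some l => PySem.Set.update chars l
  let chars : PySem.Set String :=
    if !for_path then PySem.Set.update chars pvExtraCharForFilename else chars
  -- for ch in chars: if len(ch) == 1: dirty = dirty.replace(ch, '')
  -- (one replace pass per invalid character; the result is order-independent, proved below)
  let cleaned : String :=
    chars.foldl (fun r ch => if PySem.Str.len ch == 1 then PySem.Str.replace r ch "" else r) dirty
  PySem.Str.strip cleaned

-- ===== PRECONDITION & SPEC =====
def Spec_remove_invalid_chars (dirty : String) (invalid_chars : Option (List String)) (for_path : Bool) (out : String) : Prop := out = remove_invalid_chars_alt dirty invalid_chars for_path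
instance (dirty : String) (invalid_chars : Option (List String)) (for_path : Bool) (out : String) : Decidable (Spec_remove_invalid_chars dirty invalid_chars for_path out) := by unfold Spec_remove_invalid_chars; infer_instance

-- ===== CLAIM (what is proved, stated in full; the proofs are below) =====
def Claim_equal_remove_invalid_chars : Prop := ∀ (dirty : String) (invalid_chars : Option (List String)) (for_path : Bool), Dom_remove_invalid_chars dirty invalid_chars for_path → Spec_remove_invalid_chars dirty invalid_chars for_path (remove_invalid_chars dirty invalid_chars for_path)

-- ===== LEMMAS AND PROOFS =====

-- joining the single-character strings of a list of chars gives back that list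
theorem pv_join_singletons (l : List Char) :
    (PySem.Str.join "" ((l.map (fun c => String.ofList [c])))).toList = l := by
  simp [PySem.Str.toList_join, List.map_map, Function.comp_def]

-- replace.go with a one-character pattern and empty replacement is a filter
theorem pv_go_filter (c : Char) : ∀ (fuel : Nat) (l acc : List Char), l.length ≤ fuel →
    PySem.Chars.replace.go [c] [] fuel l acc = acc.reverse ++ l.filter (fun x => !(x == c)) := by
  intro fuel
  induction fuel with
  | zero => intro l acc h; rw [List.length_eq_zero_iff.mp (Nat.le_zero.mp h)]; simp [PySem.Chars.replace.go]
  | succ n ih =>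
    intro l acc h
    cases l with
    | nil => simp [PySem.Chars.replace.go]
    | cons x t =>
      simp only [PySem.Chars.replace.go]
      by_cases hx : x = c
      · subst hx
        have : List.isPrefixOf [x] (x :: t) = true := by simp [List.isPrefixOf]
        rw [if_pos this]
        simp only [List.length_cons] at h
        simpa using ih t acc (Nat.le_of_succ_le_succ h)
      · have hpre : List.isPrefixOf [c] (x :: t) = false := by
          simp [List.isPrefixOf]
          exact fun h' => hx h'.symm
        rw [hpre]
        simp only [Bool.false_eq_true, if_false]
        rw [ih t (x :: acc) (by simpa using Nat.le_of_succ_le_succ h)]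
        simp [hx]

-- replacing a single character by the empty string is a filter
theorem pv_replace_filter (l : List Char) (c : Char) :
    PySem.Chars.replace l [c] [] = l.filter (fun x => !(x == c)) := by
  rw [PySem.Chars.replace]
  simp only [List.isEmpty_cons, Bool.false_eq_true, if_false]
  exact pv_go_filter c l.length l [] le_rfl

-- the characters of B's loop: each pass deletes one invalid character,
-- so the whole loop filters by membership in the list
theorem pv_fold_filter (L : List String) : ∀ (r : String),
    (L.foldl (fun r ch => if PySem.Str.len ch == 1 then PySem.Str.replace r ch "" else r) r).toList
      = r.toList.filter (fun c => !(decide (String.ofList [c] ∈ L))) := by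
  induction L with
  | nil => intro r; simp
  | cons s L ih =>
    intro r
    rw [List.foldl_cons, ih]
    by_cases hs : s.toList.length = 1
    · obtain ⟨c', hc'⟩ := List.length_eq_one_iff.mp hs
      have hlen : PySem.Str.len s == 1 := by simp [PySem.Str.len_eq, hs]
      rw [if_pos hlen]
      have : (PySem.Str.replace r s "").toList = r.toList.filter (fun x => !(x == c')) := by
        rw [PySem.Str.toList_replace, hc']
        simpa using pv_replace_filter r.toList c'
      rw [this, List.filter_filter]
      refine List.filter_congr (fun x _ => ?_)
      have hsx : (String.ofList [x] = s) ↔ (x = c') := by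
        constructor
        · intro h; have := congrArg String.toList h; simp [hc'] at this; exact this
        · intro h; rw [← String.ofList_toList (s := s), hc', h]
      have hos : String.ofList [c'] = s := by
        rw [← String.ofList_toList (s := s), hc']
      by_cases h1 : x = c' <;> by_cases h2 : String.ofList [x] ∈ L <;>
        simp [List.mem_cons, hsx, hos, h1, h2]
    · have hlen : (PySem.Str.len s == 1) = false := by
        simp only [PySem.Str.len_eq, beq_eq_false_iff_ne, ne_eq]
        exact fun h => hs (by exact_mod_cast h)
      rw [hlen]
      simp only [Bool.false_eq_true, if_false]
      refine List.filter_congr (fun x _ => ?_)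
      have hne : s ≠ String.ofList [x] := by
        intro h; apply hs; rw [h]; simp
      simp only [List.mem_cons]
      refine congrArg (fun b => !b) (decide_eq_decide.mpr ?_).symm
      exact ⟨fun h => h.resolve_left (fun h' => hne h'.symm), Or.inr⟩

-- A's effective invalid set and B's disagree only in the order pieces were added,
-- so the "not a member" tests agree.
theorem pv_notmem_agree (invalid_chars : Option (List String)) (for_path : Bool) (x : String) :
    (!(PySem.Set.contains
      (if !for_path then
        PySem.Set.update (match invalid_chars with
          | none => PySem.Set.ofList pvDefaultInvalidChars
          | some l => PySem.Set.update (PySem.Set.ofList l) pvDefaultInvalidChars)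
        pvExtraCharForFilename
      else (match invalid_chars with
          | none => PySem.Set.ofList pvDefaultInvalidChars
          | some l => PySem.Set.update (PySem.Set.ofList l) pvDefaultInvalidChars)) x))
    = (!(decide (x ∈
      (if !for_path then
        PySem.Set.update (match invalid_chars with
          | none => PySem.Set.ofList pvDefaultInvalidChars
          | some l => PySem.Set.update (PySem.Set.ofList pvDefaultInvalidChars) l)
        pvExtraCharForFilename
      else (match invalid_chars with
          | none => PySem.Set.ofList pvDefaultInvalidChars
          | some l => PySem.Set.update (PySem.Set.ofList pvDefaultInvalidChars) l))))) := by
  rw [PySem.Set.contains_eq_listContains, List.contains_eq_mem]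
  refine congrArg (fun b => !b) (decide_eq_decide.mpr ?_)
  cases invalid_chars <;> cases for_path <;>
    simp only [Bool.not_true, Bool.not_false, if_true, if_false, Bool.false_eq_true,
      PySem.Set.mem_update, PySem.Set.mem_ofList] <;> tauto

-- ===== VERDICT (by name: the statement is the Claim_ definition above) =====
theorem remove_invalid_chars_spec : Claim_equal_remove_invalid_chars := by
  intro dirty invalid_chars for_path _
  unfold Spec_remove_invalid_chars remove_invalid_chars remove_invalid_chars_alt
  simp only []
  have hinj : ∀ s t : String, s.toList = t.toList → s = t := fun s t h => by
    rw [← String.ofList_toList (s := s), ← String.ofList_toList (s := t), h]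
  refine congrArg PySem.Str.strip (hinj _ _ ?_)
  rw [pv_join_singletons, pv_fold_filter]
  exact List.filter_congr (fun c _ => pv_notmem_agree invalid_chars for_path (String.ofList [c]))
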